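-- pv_equiv track=rewrite | github.com/emplam27/Python-Algorithm | 프로그래머스/완전탐색 - 모의고사.py | solution
-- ===== SOURCE A (Python) =====
-- def solution(answers):
--     sol_1 = [1, 2, 3, 4, 5]
--     sol_2 = [2, 1, 2, 3, 2, 4, 2, 5]
--     sol_3 = [3, 3, 1, 1, 2, 2, 4, 4, 5, 5]
--
--     results, result_1, result_2, result_3 = [[] for _ in range(len(answers) + 1)], 0, 0, 0
--     index_1, index_2, index_3 = 0, 0, 0
--     for answer in answers:
--         if sol_1[index_1] == answer: result_1 += 1
--         if sol_2[index_2] == answer: result_2 += 1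
--         if sol_3[index_3] == answer: result_3 += 1
--         index_1, index_2, index_3 = index_1 + 1, index_2 + 1, index_3 + 1
--         if index_1 == len(sol_1): index_1 = 0
--         if index_2 == len(sol_2): index_2 = 0
--         if index_3 == len(sol_3): index_3 = 0
--     results[result_1].append(1)
--     results[result_2].append(2)
--     results[result_3].append(3)
--     for result in results[::-1]:
--         if result: return result
-- ===== SOURCE B (Python) =====
-- def solution(answers):
--     # Stage 1: histogram of the input alone -- how often each answer value
--     # occurs in each position class modulo 40 (40 = lcm of the pattern periods).
--     # The patterns are never consulted during the pass over `answers`.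
--     freq = {}
--     for i, a in enumerate(answers):
--         key = (i % 40, a)
--         freq[key] = freq.get(key, 0) + 1
--     # Stage 2: score each student from the histogram via their period-40 answer sheet.
--     patterns = [[1, 2, 3, 4, 5], [2, 1, 2, 3, 2, 4, 2, 5], [3, 3, 1, 1, 2, 2, 4, 4, 5, 5]]
--     scores = [sum(freq.get((r, full[r]), 0) for r in range(40))
--               for full in [p * (40 // len(p)) for p in patterns]]
--     # Stage 3: winners = max then filter, ascending student numbers.
--     best = max(scores)
--     return [k + 1 for k, s in enumerate(scores) if s == best]
-- ===== Notes on version B (the rewrite author's own statement) =====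
-- stated objective: alternative
-- what changed: B replaces A's pattern-cursor scoring loop and score-indexed bucket table with three staged passes: first a (position mod 40, answer) histogram dict built from the input alone, then each score computed from the histogram against the pattern expanded to its full period-40 sheet, then winners by max-then-filter.
import Mathlib
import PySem

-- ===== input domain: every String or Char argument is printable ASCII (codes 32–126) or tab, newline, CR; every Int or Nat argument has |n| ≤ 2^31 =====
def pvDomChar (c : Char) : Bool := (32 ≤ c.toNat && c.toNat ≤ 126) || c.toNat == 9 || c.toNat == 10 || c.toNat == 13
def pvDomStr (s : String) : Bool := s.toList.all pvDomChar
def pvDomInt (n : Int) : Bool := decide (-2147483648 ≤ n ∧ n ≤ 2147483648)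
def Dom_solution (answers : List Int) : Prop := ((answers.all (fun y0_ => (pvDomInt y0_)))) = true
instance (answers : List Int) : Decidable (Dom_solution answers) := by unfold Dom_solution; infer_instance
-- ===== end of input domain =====

-- B replaces A's pattern-cursor scoring loop plus score-indexed bucket table by three
-- staged passes: a (position mod 40, answer) histogram dict built from the input alone,
-- scores read off the histogram against the patterns expanded to full period-40 sheets,
-- then max-then-filter selection (objective: alternative).

-- ===== PORT A =====
-- the three fixed answer patterns (shared literals of both Pythons)
def pvPat1 : List Int := [1, 2, 3, 4, 5]
def pvPat2 : List Int := [2, 1, 2, 3, 2, 4, 2, 5]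
def pvPat3 : List Int := [3, 3, 1, 1, 2, 2, 4, 4, 5, 5]

-- one iteration of A's single loop over `answers` (state: three counters, three cursors)
def pvStepA (st : Nat × Nat × Nat × Nat × Nat × Nat) (a : Int) : Nat × Nat × Nat × Nat × Nat × Nat :=
  match st with
  | (r1, r2, r3, i1, i2, i3) =>
    let r1 := if pvPat1.getD i1 0 == a then r1 + 1 else r1
    let r2 := if pvPat2.getD i2 0 == a then r2 + 1 else r2
    let r3 := if pvPat3.getD i3 0 == a then r3 + 1 else r3
    let i1 := i1 + 1
    let i2 := i2 + 1
    let i3 := i3 + 1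
    let i1 := if i1 = pvPat1.length then 0 else i1
    let i2 := if i2 = pvPat2.length then 0 else i2
    let i3 := if i3 = pvPat3.length then 0 else i3
    (r1, r2, r3, i1, i2, i3)

def solution (answers : List Int) : List Int :=
  let st := answers.foldl pvStepA (0, 0, 0, 0, 0, 0)
  let r1 := st.1
  let r2 := st.2.1
  let r3 := st.2.2.1
  let results := List.replicate (answers.length + 1) ([] : List Int)
  let results := results.set r1 (results.getD r1 [] ++ [(1 : Int)])
  let results := results.set r2 (results.getD r2 [] ++ [(2 : Int)])
  let results := results.set r3 (results.getD r3 [] ++ [(3 : Int)])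
  (results.reverse.find? (fun r => !r.isEmpty)).getD []

-- ===== PORT B =====
-- Stage 1: freq[(i % 40, a)] += 1 over enumerate(answers)
def pvFreqB (answers : List Int) : PySem.Dict (Int × Int) Int :=
  (PySem.List.enumerate answers 0).foldl
    (fun d ia =>
      let key := (PySem.Int.mod ia.1 40, ia.2)
      d.insert key (d.getD key 0 + 1))
    PySem.Dict.empty

-- p * (40 // len(p)): the pattern expanded to its full period-40 answer sheet
def pvFullB (p : List Int) : List Int := (List.replicate (40 / p.length) p).flatten

-- sum(freq.get((r, full[r]), 0) for r in range(40))
def pvScoreB (freq : PySem.Dict (Int × Int) Int) (full : List Int) : Int :=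
  (PySem.List.pyRange 0 40 1).foldl
    (fun acc r => acc + freq.getD (r, PySem.List.pyGetD full r 0) 0) 0

def solution_alt (answers : List Int) : List Int :=
  let freq := pvFreqB answers
  let patterns : List (List Int) := [pvPat1, pvPat2, pvPat3]
  let scores := (patterns.map pvFullB).map (fun full => pvScoreB freq full)
  let best := (PySem.List.max? scores (fun y => y)).getD 0
  ((PySem.List.enumerate scores 0).filter (fun q => q.2 == best)).map (fun q => q.1 + 1)

-- ===== PRECONDITION & SPEC =====
def Spec_solution (answers : List Int) (out : List Int) : Prop := out = solution_alt answers
instance (answers : List Int) (out : List Int) : Decidable (Spec_solution answers out) := by unfold Spec_solution; infer_instance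

-- ===== CLAIM (what is proved, stated in full; the proofs are below) =====
def Claim_equal_solution : Prop := ∀ (answers : List Int), Dom_solution answers → Spec_solution answers (solution answers)

-- ===== LEMMAS AND PROOFS =====

-- count of matches of pattern p against l, starting the cyclic cursor at i
def pvCnt (p : List Int) (i : Nat) : List Int → Nat
  | [] => 0
  | a :: t => (if p.getD i 0 == a then 1 else 0) + pvCnt p ((i + 1) % p.length) t

theorem pvCnt_le (p : List Int) : ∀ (l : List Int) (i : Nat), pvCnt p i l ≤ l.length := by
  intro l
  induction l with
  | nil => intro i; simp [pvCnt]
  | cons a t ih =>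
    intro i
    have := ih ((i + 1) % p.length)
    simp only [pvCnt, List.length_cons]
    split <;> omega

theorem pvFoldA_closed : ∀ (l : List Int) (r1 r2 r3 i1 i2 i3 : Nat),
    i1 < 5 → i2 < 8 → i3 < 10 →
    l.foldl pvStepA (r1, r2, r3, i1, i2, i3) =
      (r1 + pvCnt pvPat1 i1 l, r2 + pvCnt pvPat2 i2 l, r3 + pvCnt pvPat3 i3 l,
       (i1 + l.length) % 5, (i2 + l.length) % 8, (i3 + l.length) % 10) := by
  intro l
  induction l with
  | nil => intro r1 r2 r3 i1 i2 i3 h1 h2 h3; simp [pvCnt]; omega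
  | cons a t ih =>
    intro r1 r2 r3 i1 i2 i3 h1 h2 h3
    have e1 : (if i1 + 1 = pvPat1.length then 0 else i1 + 1) = (i1 + 1) % 5 := by
      simp only [pvPat1, List.length_cons, List.length_nil]; split <;> omega
    have e2 : (if i2 + 1 = pvPat2.length then 0 else i2 + 1) = (i2 + 1) % 8 := by
      simp only [pvPat2, List.length_cons, List.length_nil]; split <;> omega
    have e3 : (if i3 + 1 = pvPat3.length then 0 else i3 + 1) = (i3 + 1) % 10 := by
      simp only [pvPat3, List.length_cons, List.length_nil]; split <;> omega
    simp only [List.foldl_cons, pvStepA, e1, e2, e3]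
    rw [ih _ _ _ _ _ _ (by omega) (by omega) (by omega)]
    simp only [pvCnt, List.length_cons, pvPat1, pvPat2, pvPat3, List.length_cons,
      List.length_nil, Nat.reduceAdd, Prod.mk.injEq]
    refine ⟨?_, ?_, ?_, by omega, by omega, by omega⟩ <;> (split <;> omega)

-- appending one answer on the right adds one cyclic comparison at cursor (i + |l|) % |p|
theorem pvCnt_append (p : List Int) (a : Int) : ∀ (l : List Int) (i : Nat), i < p.length →
    pvCnt p i (l ++ [a]) = pvCnt p i l + (if p.getD ((i + l.length) % p.length) 0 == a then 1 else 0) := by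
  intro l
  induction l with
  | nil =>
    intro i hi
    simp [pvCnt, Nat.mod_eq_of_lt hi]
  | cons x t ih =>
    intro i hi
    have hp : 0 < p.length := by omega
    simp only [List.cons_append, pvCnt, List.length_cons]
    rw [ih _ (Nat.mod_lt _ hp)]
    have : ((i + 1) % p.length + t.length) % p.length = (i + (t.length + 1)) % p.length := by
      rw [Nat.mod_add_mod]
      congr 1
      omega
    rw [this]
    exact (Nat.add_assoc _ _ _).symm

-- cyclic count against the expanded period-40 sheet equals the count against the pattern
theorem pvCnt_cyc (p full : List Int) (hlen : full.length = 40) (_hp : 0 < p.length)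
    (hdvd : p.length ∣ 40) (hget : ∀ i, i < 40 → full.getD i 0 = p.getD (i % p.length) 0) :
    ∀ (l : List Int) (i : Nat), i < 40 → pvCnt full i l = pvCnt p (i % p.length) l := by
  intro l
  induction l with
  | nil => intro i hi; simp [pvCnt]
  | cons a t ih =>
    intro i hi
    simp only [pvCnt, hlen, hget i hi]
    rw [ih _ (Nat.mod_lt _ (by omega))]
    have : (i + 1) % 40 % p.length = (i % p.length + 1) % p.length := by
      rw [Nat.mod_mod_of_dvd _ hdvd, Nat.mod_add_mod]
    rw [this]

-- the histogram dict is a Counter of the (i % 40, a) key list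
theorem pvFreq_getD (l : List Int) (k : Int × Int) :
    (pvFreqB l).getD k 0 =
      (((PySem.List.enumerate l 0).map (fun ia => (PySem.Int.mod ia.1 40, ia.2))).count k : Int) := by
  have h : pvFreqB l = ((PySem.List.enumerate l 0).map (fun ia => (PySem.Int.mod ia.1 40, ia.2))).foldl
      (fun d x => d.insert x (d.getD x 0 + 1)) PySem.Dict.empty := by
    rw [List.foldl_map]
    rfl
  rw [h, PySem.Dict.foldl_insert_getD_add_one_eq_counter, PySem.Dict.getD_counter]

-- total histogram lookup over the 40 residues, as a function of the key list
def pvSumScore (K : List (Int × Int)) (full : List Int) : Int :=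
  ((PySem.List.pyRange 0 40 1).map (fun r => (K.count (r, PySem.List.pyGetD full r 0) : Int))).sum

theorem pvScoreB_eq_sumScore (l full : List Int) :
    pvScoreB (pvFreqB l) full =
      pvSumScore ((PySem.List.enumerate l 0).map (fun ia => (PySem.Int.mod ia.1 40, ia.2))) full := by
  simp only [pvScoreB, PySem.List.foldl_add, pvFreq_getD, pvSumScore, zero_add]

-- appending one key (j, a), j < 40, raises the total by 1 exactly when the sheet agrees at j
theorem pvSumScore_append (K : List (Int × Int)) (full : List Int) (j : Nat) (a : Int) (hj : j < 40) :
    pvSumScore (K ++ [((j : Int), a)]) full =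
      pvSumScore K full + (if full.getD j 0 == a then 1 else 0) := by
  have hcnt : ∀ r : Int, ((K ++ [((j : Int), a)]).count (r, PySem.List.pyGetD full r 0) : Int)
      = (K.count (r, PySem.List.pyGetD full r 0) : Int)
        + (if (((j : Int), a) : Int × Int) == (r, PySem.List.pyGetD full r 0) then 1 else 0) := by
    intro r
    rw [List.count_append]
    push_cast
    congr 1
    simp [List.count_singleton]
  simp only [pvSumScore]
  rw [List.map_congr_left (fun r _ => hcnt r), PySem.List.sum_map_add_int,
    PySem.List.sum_map_ite_one_zero]
  congr 1
  by_cases hfa : full.getD j 0 = a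
  · have h1 : (PySem.List.pyRange 0 40 1).countP
        (fun r => (((j : Int), a) : Int × Int) == (r, PySem.List.pyGetD full r 0))
        = (PySem.List.pyRange 0 40 1).countP (· == (j : Int)) := by
      apply List.countP_congr
      intro r hr
      rw [PySem.List.mem_pyRange_one] at hr
      by_cases hrj : r = (j : Int)
      · subst hrj
        simp [PySem.List.pyGetD_natCast, -List.getD_eq_getElem?_getD, hfa]
      · simp [Prod.ext_iff, hrj]
        intro h; omega
    rw [h1, ← List.count_eq_countP, List.count_eq_one_of_mem (PySem.List.nodup_pyRange_one 0 40)
      (by rw [PySem.List.mem_pyRange_one]; constructor <;> omega)]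
    have e : (full.getD j 0 == a) = true := beq_iff_eq.mpr hfa
    rw [e]
    simp
  · have h0 : (PySem.List.pyRange 0 40 1).countP
        (fun r => (((j : Int), a) : Int × Int) == (r, PySem.List.pyGetD full r 0)) = 0 := by
      rw [List.countP_eq_zero]
      intro r hr
      rw [PySem.List.mem_pyRange_one] at hr
      by_cases hrj : r = (j : Int)
      · subst hrj
        simp [PySem.List.pyGetD_natCast, -List.getD_eq_getElem?_getD]
        intro h; exact absurd h.symm hfa
      · simp [Prod.ext_iff]
        intro h; omega
    rw [h0]
    have e : (full.getD j 0 == a) = false := beq_eq_false_iff_ne.mpr hfa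
    rw [e]
    simp

-- staged histogram scoring = A's single-pass cyclic count (for a period-40 sheet)
theorem pvScore_eq_cnt (full : List Int) (hlen : full.length = 40) :
    ∀ (l : List Int), pvScoreB (pvFreqB l) full = (pvCnt full 0 l : Int) := by
  intro l
  induction l using List.reverseRecOn with
  | nil =>
    simp [pvScoreB_eq_sumScore, pvSumScore, PySem.List.enumerate_nil, pvCnt]
  | append_singleton l x ih =>
    rw [pvScoreB_eq_sumScore] at ih ⊢
    have hkey : PySem.List.enumerate (l ++ [x]) 0 = PySem.List.enumerate l 0 ++ [(((l.length : Int)), x)] := by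
      rw [PySem.List.enumerate_append]
      simp [PySem.List.enumerate_cons, PySem.List.enumerate_nil]
    have hmod : PySem.Int.mod ((l.length : Int)) 40 = (((l.length % 40 : Nat)) : Int) := by
      exact_mod_cast PySem.Int.mod_natCast l.length 40
    rw [hkey, List.map_append]
    simp only [List.map_cons, List.map_nil, hmod]
    rw [pvSumScore_append _ _ _ _ (Nat.mod_lt _ (by omega)), ih,
      pvCnt_append full x l 0 (by omega)]
    push_cast
    congr 1
    rw [hlen]
    simp

-- first non-empty element of L.reverse, when everything above index m is empty
theorem pvFindRev (L : List (List Int)) (m : Nat) (hm : m < L.length)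
    (hne : L[m] ≠ []) (htop : ∀ j (h : j < L.length), m < j → L[j] = []) :
    L.reverse.find? (fun r => !r.isEmpty) = some L[m] := by
  have hsplit : L = L.take (m + 1) ++ L.drop (m + 1) := (List.take_append_drop _ _).symm
  have hdropnone : (L.drop (m + 1)).reverse.find? (fun r => !r.isEmpty) = none := by
    rw [List.find?_eq_none]
    intro x hx
    rw [List.mem_reverse] at hx
    obtain ⟨i, hi, rfl⟩ := List.mem_iff_getElem.1 hx
    have hb : m + 1 + i < L.length := by simp at hi; omega
    have hx' : (L.drop (m+1))[i] = L[m + 1 + i]'hb := List.getElem_drop ..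
    rw [hx', htop _ hb (by omega)]
    simp
  have htake : L.take (m + 1) = L.take m ++ [L[m]] := by
    rw [List.take_add_one]
    simp [List.getElem?_eq_getElem hm]
  conv_lhs => rw [hsplit]
  rw [List.reverse_append, List.find?_append, hdropnone]
  rw [htake, List.reverse_append]
  simp [hne]

-- contents of A's bucket table at index j (r1, r2, r3 ≤ n, j ≤ n)
theorem pvTable (n r1 r2 r3 j : Nat) (h1 : r1 ≤ n) (h2 : r2 ≤ n) (h3 : r3 ≤ n) (hj : j ≤ n) :
    (((((List.replicate (n + 1) ([] : List Int)).set r1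
        ((List.replicate (n + 1) ([] : List Int)).getD r1 [] ++ [(1 : Int)])).set r2
        (((List.replicate (n + 1) ([] : List Int)).set r1
          ((List.replicate (n + 1) ([] : List Int)).getD r1 [] ++ [(1 : Int)])).getD r2 [] ++ [(2 : Int)])).set r3
        ((((List.replicate (n + 1) ([] : List Int)).set r1
          ((List.replicate (n + 1) ([] : List Int)).getD r1 [] ++ [(1 : Int)])).set r2
          (((List.replicate (n + 1) ([] : List Int)).set r1
            ((List.replicate (n + 1) ([] : List Int)).getD r1 [] ++ [(1 : Int)])).getD r2 [] ++ [(2 : Int)])).getD r3 [] ++ [(3 : Int)]))[j]'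
        (by simp; omega))
    = ((if r1 = j then [(1 : Int)] else []) ++ (if r2 = j then [(2 : Int)] else []) ++ (if r3 = j then [(3 : Int)] else [])) := by
  have hr1 : r1 < n + 1 := by omega
  have hr2 : r2 < n + 1 := by omega
  have hr3 : r3 < n + 1 := by omega
  simp only [List.getD_eq_getElem?_getD, List.getElem?_set, List.getElem_set,
    List.getElem?_eq_getElem (by simp [hr1] : r1 < ((List.replicate (n+1) ([]:List Int))).length),
    List.length_set, List.length_replicate]
  by_cases e12 : r2 = r1 <;> by_cases e13 : r3 = r1 <;> by_cases e23 : r3 = r2 <;>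
    by_cases ej1 : r1 = j <;> by_cases ej2 : r2 = j <;> by_cases ej3 : r3 = j <;>
    simp_all [List.getElem_replicate]

-- B's selection (filter the enumerated scores by the max) on a 3-element score list
theorem pvSelB (s1 s2 s3 best : Int) :
    ((PySem.List.enumerate [s1, s2, s3] 0).filter (fun q => q.2 == best)).map (fun q => q.1 + 1) =
      (if s1 = best then [(1 : Int)] else []) ++ (if s2 = best then [(2 : Int)] else []) ++
        (if s3 = best then [(3 : Int)] else []) := by
  have e1 : (s1 == best) = (if s1 = best then true else false) := by by_cases h : s1 = best <;> simp [h]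
  have e2 : (s2 == best) = (if s2 = best then true else false) := by by_cases h : s2 = best <;> simp [h]
  have e3 : (s3 == best) = (if s3 = best then true else false) := by by_cases h : s3 = best <;> simp [h]
  by_cases h1 : s1 = best <;> by_cases h2 : s2 = best <;> by_cases h3 : s3 = best <;>
    simp [PySem.List.enumerate_cons, PySem.List.enumerate_nil, List.filter, List.map,
      e1, e2, e3, h1, h2, h3]

-- A's reverse scan over the bucket table selects exactly the max scorers, in order 1,2,3
theorem pvSelA (n c1 c2 c3 : Nat) (h1 : c1 ≤ n) (h2 : c2 ≤ n) (h3 : c3 ≤ n) :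
    ((((((List.replicate (n + 1) ([] : List Int)).set c1
        ((List.replicate (n + 1) ([] : List Int)).getD c1 [] ++ [(1 : Int)])).set c2
        (((List.replicate (n + 1) ([] : List Int)).set c1
          ((List.replicate (n + 1) ([] : List Int)).getD c1 [] ++ [(1 : Int)])).getD c2 [] ++ [(2 : Int)])).set c3
        ((((List.replicate (n + 1) ([] : List Int)).set c1
          ((List.replicate (n + 1) ([] : List Int)).getD c1 [] ++ [(1 : Int)])).set c2
          (((List.replicate (n + 1) ([] : List Int)).set c1
            ((List.replicate (n + 1) ([] : List Int)).getD c1 [] ++ [(1 : Int)])).getD c2 [] ++ [(2 : Int)])).getD c3 [] ++ [(3 : Int)])).reverse.find?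
        (fun r => !r.isEmpty)).getD [])
    = ((if c1 = max c1 (max c2 c3) then [(1 : Int)] else []) ++
        (if c2 = max c1 (max c2 c3) then [(2 : Int)] else []) ++
        (if c3 = max c1 (max c2 c3) then [(3 : Int)] else [])) := by
  have hmn : max c1 (max c2 c3) ≤ n := by omega
  have hmem : c1 = max c1 (max c2 c3) ∨ c2 = max c1 (max c2 c3) ∨ c3 = max c1 (max c2 c3) := by omega
  rw [pvFindRev _ (max c1 (max c2 c3)) (by simp; omega) ?hne ?htop]
  case hne =>
    rw [pvTable n c1 c2 c3 _ h1 h2 h3 hmn]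
    rcases hmem with h | h | h <;> (rw [← h]; simp)
  case htop =>
    intro j hjlt hmj
    have hjn : j ≤ n := by simp at hjlt; omega
    rw [pvTable n c1 c2 c3 _ h1 h2 h3 hjn]
    have e1 : ¬ c1 = j := by omega
    have e2 : ¬ c2 = j := by omega
    have e3 : ¬ c3 = j := by omega
    simp [e1, e2, e3]
  rw [Option.getD_some, pvTable n c1 c2 c3 _ h1 h2 h3 hmn]

-- ===== VERDICT (by name: the statement is the Claim_ definition above) =====
theorem solution_spec : Claim_equal_solution := by
  intro answers _
  unfold Spec_solution
  -- A's side in closed form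
  have hA : solution answers =
      ((if pvCnt pvPat1 0 answers = max (pvCnt pvPat1 0 answers) (max (pvCnt pvPat2 0 answers) (pvCnt pvPat3 0 answers)) then [(1 : Int)] else []) ++
       (if pvCnt pvPat2 0 answers = max (pvCnt pvPat1 0 answers) (max (pvCnt pvPat2 0 answers) (pvCnt pvPat3 0 answers)) then [(2 : Int)] else []) ++
       (if pvCnt pvPat3 0 answers = max (pvCnt pvPat1 0 answers) (max (pvCnt pvPat2 0 answers) (pvCnt pvPat3 0 answers)) then [(3 : Int)] else [])) := by
    unfold solution
    rw [pvFoldA_closed answers 0 0 0 0 0 0 (by omega) (by omega) (by omega)]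
    simp only [Nat.zero_add]
    exact pvSelA answers.length _ _ _ (pvCnt_le _ _ _) (pvCnt_le _ _ _) (pvCnt_le _ _ _)
  -- B's side: the three histogram scores are the three cyclic counts
  have hs1 : pvScoreB (pvFreqB answers) (pvFullB pvPat1) = ((pvCnt pvPat1 0 answers : Nat) : Int) := by
    rw [pvScore_eq_cnt _ (by decide),
      pvCnt_cyc pvPat1 (pvFullB pvPat1) (by decide) (by decide) (by decide)
        (by decide) answers 0 (by omega), Nat.zero_mod]
  have hs2 : pvScoreB (pvFreqB answers) (pvFullB pvPat2) = ((pvCnt pvPat2 0 answers : Nat) : Int) := by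
    rw [pvScore_eq_cnt _ (by decide),
      pvCnt_cyc pvPat2 (pvFullB pvPat2) (by decide) (by decide) (by decide)
        (by decide) answers 0 (by omega), Nat.zero_mod]
  have hs3 : pvScoreB (pvFreqB answers) (pvFullB pvPat3) = ((pvCnt pvPat3 0 answers : Nat) : Int) := by
    rw [pvScore_eq_cnt _ (by decide),
      pvCnt_cyc pvPat3 (pvFullB pvPat3) (by decide) (by decide) (by decide)
        (by decide) answers 0 (by omega), Nat.zero_mod]
  have hB : solution_alt answers =
      ((if ((pvCnt pvPat1 0 answers : Nat) : Int) = ((max (pvCnt pvPat1 0 answers) (max (pvCnt pvPat2 0 answers) (pvCnt pvPat3 0 answers)) : Nat) : Int) then [(1 : Int)] else []) ++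
       (if ((pvCnt pvPat2 0 answers : Nat) : Int) = ((max (pvCnt pvPat1 0 answers) (max (pvCnt pvPat2 0 answers) (pvCnt pvPat3 0 answers)) : Nat) : Int) then [(2 : Int)] else []) ++
       (if ((pvCnt pvPat3 0 answers : Nat) : Int) = ((max (pvCnt pvPat1 0 answers) (max (pvCnt pvPat2 0 answers) (pvCnt pvPat3 0 answers)) : Nat) : Int) then [(3 : Int)] else [])) := by
    unfold solution_alt
    simp only [List.map_cons, List.map_nil, hs1, hs2, hs3]
    rw [PySem.List.max?_id_cons]
    simp only [List.foldl_cons, List.foldl_nil, Option.getD_some]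
    rw [pvSelB]
    have hbest : (max (max ((pvCnt pvPat1 0 answers : Nat) : Int) ((pvCnt pvPat2 0 answers : Nat) : Int)) ((pvCnt pvPat3 0 answers : Nat) : Int))
        = ((max (pvCnt pvPat1 0 answers) (max (pvCnt pvPat2 0 answers) (pvCnt pvPat3 0 answers)) : Nat) : Int) := by
      push_cast
      omega
    rw [hbest]
  rw [hA, hB]
  simp only [Nat.cast_inj]
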